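-- pv_equiv track=rewrite | github.com/Skyffox/Project-Euler | python/p078.py | partition_numbers
-- ===== SOURCE A (Python) =====
-- from typing import List
--
-- def partition_numbers(limit: int)  -> List[int]:
--     """
--     Calculate partition numbers p(n) for all n up to the given limit using Euler's Pentagonal Number Theorem.
--
--     Args:
--         limit (int): The upper limit up to which partition numbers are calculated.
--
--     Returns:
--         list: A list where p[n] is the partition number for n, modulo 1,000,000.
--     """
--     # Initialize the list to store partition numbers with base case p(0) = 1.
--     p = [0] * (limit + 1)
--     p[0] = 1 # Base case: there's exactly one way to partition 0 (the empty sum).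
--
--     for n in range(1, limit + 1):
--         total = 0
--         k = 1
--         while True:
--             # Generalized pentagonal numbers: k * (3k - 1) / 2 and k * (3k + 1) / 2
--             pentagonal1 = k * (3 * k - 1) // 2
--             pentagonal2 = k * (3 * k + 1) // 2
--
--             # Break if the pentagonal numbers exceed n
--             if pentagonal1 > n:
--                 break
--
--             # Calculate the contribution of the current pentagonal numbers
--             sign1 = -1 if k % 2 == 0 else 1
--             total += sign1 * p[n - pentagonal1]
--
--             if pentagonal2 <= n:
--                 sign2 = -1 if k % 2 == 0 else 1
--                 total += sign2 * p[n - pentagonal2]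
--
--             k += 1
--
--         # Store the partition number modulo 1,000,000
--         p[n] = total % 1000000
--
--     return p
-- ===== SOURCE B (Python) =====
-- def partition_numbers(limit: int) -> list:
--     MOD = 1000000
--     # Forward ("scatter") formulation of the pentagonal recurrence: instead of, for each n,
--     # looking BACK at p[n-g] for every generalized pentagonal g, we push each finalized p[n]
--     # FORWARD into a running table of signed contributions; p[n] is then just contrib[n] % MOD.
--     p = [0] * (limit + 1)
--     p[0] = 1
--     contrib = [0] * (limit + 1)
--     for n in range(0, limit + 1):
--         if n > 0:
--             p[n] = contrib[n] % MOD
--         pn = p[n]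
--         k = 1
--         while True:
--             i1 = n + k * (3 * k - 1) // 2
--             if i1 > limit:
--                 break
--             s = 1 if k % 2 else -1
--             contrib[i1] += s * pn
--             i2 = n + k * (3 * k + 1) // 2
--             if i2 <= limit:
--                 contrib[i2] += s * pn
--             k += 1
--     return p
-- ===== Notes on version B (the rewrite author's own statement) =====
-- stated objective: alternative
-- what changed: B replaces A's backward 'gather' DP (for each n, scan pentagonal numbers and pull signed p[n-g] from the past) by the dual forward 'scatter' DP: it maintains a second running contributions array, pushes each finalized p[n] forward into slots n+g for every generalized pentagonal g, and reads p[n] as contrib[n] % 1e6, so no per-n backward scan exists.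
import Mathlib
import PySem

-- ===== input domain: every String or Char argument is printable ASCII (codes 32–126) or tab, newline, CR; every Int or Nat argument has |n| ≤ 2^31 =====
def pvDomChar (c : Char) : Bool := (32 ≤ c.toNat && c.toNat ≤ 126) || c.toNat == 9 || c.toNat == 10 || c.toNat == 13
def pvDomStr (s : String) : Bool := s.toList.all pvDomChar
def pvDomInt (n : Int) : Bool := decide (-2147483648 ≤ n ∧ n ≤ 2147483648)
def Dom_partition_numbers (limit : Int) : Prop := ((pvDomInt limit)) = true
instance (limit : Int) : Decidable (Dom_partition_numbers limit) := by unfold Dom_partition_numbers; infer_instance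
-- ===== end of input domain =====

-- B replaces A's backward 'gather' loop (for each n, pull signed p[n-g] over pentagonal g) by the
-- dual forward 'scatter' DP: a second running contributions array into which each finalized p[n] is
-- pushed at the slots n+g, so p[n] is read off as contrib[n] % 1e6; same values wherever A returns.

-- ===== PORT A =====
-- inner 'while True' loop of A; fuel is a termination guard only (the passed fuel always suffices
-- since pentagonal1(k) ≥ k, so the loop breaks once k exceeds n)
def pvAInner (p : List Int) (n : Int) (total k : Int) : Nat → Int
  | 0 => total
  | fuel + 1 =>
    let pentagonal1 := PySem.Int.floordiv (k * (3 * k - 1)) 2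
    let pentagonal2 := PySem.Int.floordiv (k * (3 * k + 1)) 2
    if pentagonal1 > n then total
    else
      let sign1 : Int := if PySem.Int.mod k 2 = 0 then -1 else 1
      let total1 := total + sign1 * PySem.List.pyGetD p (n - pentagonal1) 0
      let total2 :=
        if pentagonal2 ≤ n then
          let sign2 : Int := if PySem.Int.mod k 2 = 0 then -1 else 1
          total1 + sign2 * PySem.List.pyGetD p (n - pentagonal2) 0
        else total1
      pvAInner p n total2 (k + 1) fuel

def partition_numbers (limit : Int) : List Int :=
  let p0 := List.replicate (limit + 1).toNat 0
  -- p[0] = 1 (IndexError when limit < 0: excluded by Pre_)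
  let p1 := PySem.List.pySetD p0 0 1
  (PySem.List.pyRange 1 (limit + 1) 1).foldl
    (fun p n =>
      PySem.List.pySetD p n (PySem.Int.mod (pvAInner p n 0 1 (n.toNat + 2)) 1000000)) p1

-- ===== PORT B =====
-- B's inner 'while n + k*(3*k-1)//2 <= limit' scatter loop; fuel is a termination guard only
def pvBScatter (limit n pn : Int) (contrib k : Int) : Nat → List Int → List Int
  | 0, c => c
  | fuel + 1, c =>
    let i1 := n + PySem.Int.floordiv (k * (3 * k - 1)) 2
    if i1 ≤ limit then
      let s : Int := if PySem.Int.mod k 2 ≠ 0 then 1 else -1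
      let c1 := PySem.List.pySetD c i1 (PySem.List.pyGetD c i1 0 + s * pn)
      let i2 := n + PySem.Int.floordiv (k * (3 * k + 1)) 2
      let c2 := if i2 ≤ limit then
          PySem.List.pySetD c1 i2 (PySem.List.pyGetD c1 i2 0 + s * pn)
        else c1
      pvBScatter limit n pn contrib (k + 1) fuel c2
    else c

def partition_numbers_alt (limit : Int) : List Int :=
  let p0 := List.replicate (limit + 1).toNat 0
  let p1 := PySem.List.pySetD p0 0 1   -- p[0] = 1 (IndexError when limit < 0: excluded by Pre_)
  let c0 := List.replicate (limit + 1).toNat 0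
  ((PySem.List.pyRange 0 (limit + 1) 1).foldl
    (fun (st : List Int × List Int) n =>
      let p := if n > 0 then
          PySem.List.pySetD st.1 n (PySem.Int.mod (PySem.List.pyGetD st.2 n 0) 1000000)
        else st.1
      let pn := PySem.List.pyGetD p n 0
      (p, pvBScatter limit n pn 0 1 (limit.toNat + 2) st.2)) (p1, c0)).1

-- ===== PRECONDITION & SPEC =====
-- Pre_ excludes negative limits, where A (and B) raise IndexError assigning p[0] into an empty list
def Pre_partition_numbers (limit : Int) : Prop := 0 ≤ limit
instance (limit : Int) : Decidable (Pre_partition_numbers limit) := by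
  unfold Pre_partition_numbers; infer_instance

def pvWitness_partition_numbers : Int := 5

def Spec_partition_numbers (limit : Int) (out : List Int) : Prop := out = partition_numbers_alt limit
instance (limit : Int) (out : List Int) : Decidable (Spec_partition_numbers limit out) := by
  unfold Spec_partition_numbers; infer_instance

-- ===== CLAIM =====
def Claim_equal_partition_numbers : Prop := ∀ (limit : Int), Dom_partition_numbers limit → Pre_partition_numbers limit → Spec_partition_numbers limit (partition_numbers limit)

-- ===== LEMMAS AND PROOFS =====

-- proof-side list of the generalized pentagonal numbers ≤ lim with their signs, in order
def pvBPairs (lim k : Int) : Nat → List (Int × Int)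
  | 0 => []
  | fuel + 1 =>
    let g1 := PySem.Int.floordiv (k * (3 * k - 1)) 2
    if g1 ≤ lim then
      let sign : Int := if PySem.Int.mod k 2 ≠ 0 then 1 else -1
      let g2 := PySem.Int.floordiv (k * (3 * k + 1)) 2
      let rest := pvBPairs lim (k + 1) fuel
      if g2 ≤ lim then (g1, sign) :: (g2, sign) :: rest else (g1, sign) :: rest
    else []

-- the two ways the two sources write the sign of the k-th contribution agree
lemma pv_sign_eq (k : Int) :
    (if PySem.Int.mod k 2 ≠ 0 then (1 : Int) else -1)
      = (if PySem.Int.mod k 2 = 0 then (-1 : Int) else 1) := by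
  by_cases h : PySem.Int.mod k 2 = 0
  · rw [if_neg (not_not_intro h), if_pos h]
  · rw [if_pos h, if_neg h]

lemma pv_g1_ge (k : Int) (hk : 1 ≤ k) : k ≤ PySem.Int.floordiv (k * (3 * k - 1)) 2 := by
  rw [PySem.Int.le_floordiv_iff_mul_le (by norm_num)]
  nlinarith

lemma pv_g1_le_g2 (k : Int) (hk : 1 ≤ k) :
    PySem.Int.floordiv (k * (3 * k - 1)) 2 ≤ PySem.Int.floordiv (k * (3 * k + 1)) 2 := by
  rw [PySem.Int.floordiv_eq_ediv_of_pos (by norm_num), PySem.Int.floordiv_eq_ediv_of_pos (by norm_num)]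
  exact Int.ediv_le_ediv (by norm_num) (by nlinarith)

lemma pv_g2_lt_g1_succ (k : Int) (hk : 1 ≤ k) :
    PySem.Int.floordiv (k * (3 * k + 1)) 2 < PySem.Int.floordiv ((k + 1) * (3 * (k + 1) - 1)) 2 := by
  have h1 := PySem.Int.floordiv_mul_add_mod (k * (3 * k + 1)) 2
  have h2 := PySem.Int.mod_nonneg (k * (3 * k + 1)) (b := 2) (by norm_num)
  have h3 := PySem.Int.mod_lt (k * (3 * k + 1)) (b := 2) (by norm_num)
  rw [show PySem.Int.floordiv (k * (3 * k + 1)) 2 < PySem.Int.floordiv ((k + 1) * (3 * (k + 1) - 1)) 2 ↔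
      PySem.Int.floordiv (k * (3 * k + 1)) 2 + 1 ≤ PySem.Int.floordiv ((k + 1) * (3 * (k + 1) - 1)) 2 from by omega]
  rw [PySem.Int.le_floordiv_iff_mul_le (by norm_num)]
  nlinarith

lemma pv_g1_mono (k : Int) (hk : 1 ≤ k) :
    PySem.Int.floordiv (k * (3 * k - 1)) 2 ≤ PySem.Int.floordiv ((k + 1) * (3 * (k + 1) - 1)) 2 :=
  le_trans (pv_g1_le_g2 k hk) (le_of_lt (pv_g2_lt_g1_succ k hk))

-- every pentagonal number emitted from index k onward is >= the k-th one
lemma pv_bpairs_lb : ∀ (fuel : Nat) (lim k : Int), 1 ≤ k →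
    ∀ pr ∈ pvBPairs lim k fuel, PySem.Int.floordiv (k * (3 * k - 1)) 2 ≤ pr.1 := by
  intro fuel
  induction fuel with
  | zero => intro lim k hk pr hpr; simp [pvBPairs] at hpr
  | succ f ih =>
    intro lim k hk pr hpr
    simp only [pvBPairs] at hpr
    by_cases h1 : PySem.Int.floordiv (k * (3 * k - 1)) 2 ≤ lim
    · rw [if_pos h1] at hpr
      by_cases h2 : PySem.Int.floordiv (k * (3 * k + 1)) 2 ≤ lim
      · rw [if_pos h2] at hpr
        rcases List.mem_cons.mp hpr with rfl | hpr'
        · exact le_refl _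
        · rcases List.mem_cons.mp hpr' with rfl | hpr''
          · exact pv_g1_le_g2 k hk
          · exact le_trans (pv_g1_mono k hk) (ih lim (k + 1) (by omega) pr hpr'')
      · rw [if_neg h2] at hpr
        rcases List.mem_cons.mp hpr with rfl | hpr'
        · exact le_refl _
        · exact le_trans (pv_g1_mono k hk) (ih lim (k + 1) (by omega) pr hpr')
    · rw [if_neg h1] at hpr
      simp at hpr

lemma pv_bpairs_ub : ∀ (fuel : Nat) (lim k : Int),
    ∀ pr ∈ pvBPairs lim k fuel, pr.1 ≤ lim := by
  intro fuel
  induction fuel with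
  | zero => intro lim k pr hpr; simp [pvBPairs] at hpr
  | succ f ih =>
    intro lim k pr hpr
    simp only [pvBPairs] at hpr
    by_cases h1 : PySem.Int.floordiv (k * (3 * k - 1)) 2 ≤ lim
    · rw [if_pos h1] at hpr
      by_cases h2 : PySem.Int.floordiv (k * (3 * k + 1)) 2 ≤ lim
      · rw [if_pos h2] at hpr
        rcases List.mem_cons.mp hpr with rfl | hpr'
        · exact h1
        · rcases List.mem_cons.mp hpr' with rfl | hpr''
          · exact h2
          · exact ih lim (k + 1) pr hpr''
      · rw [if_neg h2] at hpr
        rcases List.mem_cons.mp hpr with rfl | hpr'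
        · exact h1
        · exact ih lim (k + 1) pr hpr'
    · rw [if_neg h1] at hpr
      simp at hpr

lemma pv_bpairs_nil : ∀ (fuel : Nat) (lim k : Int), 1 ≤ k → lim < k →
    pvBPairs lim k fuel = [] := by
  intro fuel lim k hk hlt
  cases fuel with
  | zero => rfl
  | succ f =>
    simp only [pvBPairs]
    rw [if_neg]
    have := pv_g1_ge k hk
    omega

-- the fuel guard is irrelevant once it exceeds the natural stopping point
lemma pv_bpairs_fuel : ∀ (f f' : Nat) (lim k : Int), 1 ≤ k →
    lim < k + f → lim < k + f' → pvBPairs lim k f = pvBPairs lim k f' := by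
  intro f
  induction f with
  | zero =>
    intro f' lim k hk h h'
    rw [pv_bpairs_nil f' lim k hk (by omega)]; rfl
  | succ f ih =>
    intro f' lim k hk h h'
    cases f' with
    | zero => rw [pv_bpairs_nil (f + 1) lim k hk (by omega)]; rfl
    | succ f' =>
      simp only [pvBPairs]
      rw [ih f' lim (k + 1) (by omega) (by omega) (by omega)]

-- restricting the signed pentagonal table for lim to entries <= n gives the table for n
lemma pv_bpairs_filter : ∀ (fuel : Nat) (lim n k : Int), 1 ≤ k → n ≤ lim →
    (pvBPairs lim k fuel).filter (fun gs => gs.1 ≤ n) = pvBPairs n k fuel := by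
  intro fuel
  induction fuel with
  | zero => intro lim n k hk hn; rfl
  | succ f ih =>
    intro lim n k hk hn
    simp only [pvBPairs]
    by_cases h1 : PySem.Int.floordiv (k * (3 * k - 1)) 2 ≤ lim
    · rw [if_pos h1]
      by_cases h1n : PySem.Int.floordiv (k * (3 * k - 1)) 2 ≤ n
      · rw [if_pos h1n]
        by_cases h2n : PySem.Int.floordiv (k * (3 * k + 1)) 2 ≤ n
        · rw [if_pos (le_trans h2n hn), if_pos h2n]
          simp only [List.filter_cons, decide_eq_true_eq, if_pos h1n, if_pos h2n]
          rw [ih lim n (k + 1) (by omega) hn]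
        · by_cases h2 : PySem.Int.floordiv (k * (3 * k + 1)) 2 ≤ lim
          · rw [if_pos h2, if_neg h2n]
            simp only [List.filter_cons, decide_eq_true_eq, if_pos h1n, if_neg h2n]
            rw [ih lim n (k + 1) (by omega) hn]
          · rw [if_neg h2, if_neg h2n]
            simp only [List.filter_cons, decide_eq_true_eq, if_pos h1n]
            rw [ih lim n (k + 1) (by omega) hn]
      · rw [if_neg h1n]
        rw [List.filter_eq_nil_iff.mpr]
        intro pr hpr
        have hlow : PySem.Int.floordiv (k * (3 * k - 1)) 2 ≤ pr.1 := by
          apply pv_bpairs_lb (f + 1) lim k hk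
          simp only [pvBPairs]
          rw [if_pos h1]
          exact hpr
        simp only [decide_eq_true_eq]
        omega
    · rw [if_neg h1, if_neg (by omega : ¬ PySem.Int.floordiv (k * (3 * k - 1)) 2 ≤ n)]
      rfl

-- A's inner while-loop computes exactly the signed sum over the pentagonal table for n
lemma pv_inner_sum : ∀ (fuel : Nat) (p : List Int) (n t k : Int),
    pvAInner p n t k fuel
      = t + ((pvBPairs n k fuel).map (fun gs => gs.2 * PySem.List.pyGetD p (n - gs.1) 0)).sum := by
  intro fuel
  induction fuel with
  | zero => intro p n t k; simp [pvAInner, pvBPairs]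
  | succ f ih =>
    intro p n t k
    simp only [pvAInner, pvBPairs]
    by_cases h1 : PySem.Int.floordiv (k * (3 * k - 1)) 2 ≤ n
    · rw [if_neg (not_lt.mpr h1), if_pos h1, pv_sign_eq]
      by_cases h2 : PySem.Int.floordiv (k * (3 * k + 1)) 2 ≤ n
      · rw [if_pos h2, if_pos h2, ih]
        simp only [List.map_cons, List.sum_cons]
        ring
      · rw [if_neg h2, if_neg h2, ih]
        simp only [List.map_cons, List.sum_cons]
        ring
    · rw [if_pos (not_le.mp h1), if_neg h1]
      simp

-- one scatter write as a fold step
def pvScStep (n pn : Int) (c : List Int) (gs : Int × Int) : List Int :=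
  PySem.List.pySetD c (n + gs.1) (PySem.List.pyGetD c (n + gs.1) 0 + gs.2 * pn)

-- B's scatter loop is the fold of single writes over the pentagonal table for limit - n
lemma pv_scatter_eq_fold : ∀ (fuel : Nat) (limit n pn k : Int) (c : List Int),
    pvBScatter limit n pn 0 k fuel c
      = (pvBPairs (limit - n) k fuel).foldl (pvScStep n pn) c := by
  intro fuel
  induction fuel with
  | zero => intro limit n pn k c; rfl
  | succ f ih =>
    intro limit n pn k c
    simp only [pvBScatter, pvBPairs]
    by_cases h1 : n + PySem.Int.floordiv (k * (3 * k - 1)) 2 ≤ limit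
    · rw [if_pos h1, if_pos (by omega : PySem.Int.floordiv (k * (3 * k - 1)) 2 ≤ limit - n)]
      by_cases h2 : n + PySem.Int.floordiv (k * (3 * k + 1)) 2 ≤ limit
      · rw [if_pos h2, if_pos (by omega : PySem.Int.floordiv (k * (3 * k + 1)) 2 ≤ limit - n), ih]
        rfl
      · rw [if_neg h2, if_neg (by omega : ¬ PySem.Int.floordiv (k * (3 * k + 1)) 2 ≤ limit - n), ih]
        rfl
    · rw [if_neg h1, if_neg (by omega : ¬ PySem.Int.floordiv (k * (3 * k - 1)) 2 ≤ limit - n)]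
      rfl

lemma pv_scstep_length (n pn : Int) (c : List Int) (gs : Int × Int) :
    (pvScStep n pn c gs).length = c.length := by
  simp [pvScStep, PySem.List.length_pySetD]

lemma pv_fold_scatter_length : ∀ (l : List (Int × Int)) (n pn : Int) (c : List Int),
    (l.foldl (pvScStep n pn) c).length = c.length := by
  intro l
  induction l with
  | nil => intro n pn c; rfl
  | cons gs l ih => intro n pn c; rw [List.foldl_cons, ih, pv_scstep_length]

-- reading one cell of the fold of scatter writes
lemma pv_fold_scatter_get : ∀ (l : List (Int × Int)) (n pn : Int) (c : List Int) (i : Int),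
    (∀ gs ∈ l, 0 ≤ n + gs.1 ∧ n + gs.1 < (c.length : Int)) →
    0 ≤ i → i < (c.length : Int) →
    PySem.List.pyGetD (l.foldl (pvScStep n pn) c) i 0
      = PySem.List.pyGetD c i 0
        + ((l.filter (fun gs => n + gs.1 = i)).map (fun gs => gs.2 * pn)).sum := by
  intro l
  induction l with
  | nil => intro n pn c i _ _ _; simp
  | cons gs l ih =>
    intro n pn c i hb hi hil
    obtain ⟨hg0, hgl⟩ := hb gs (List.mem_cons_self ..)
    have hlen : (pvScStep n pn c gs).length = c.length := pv_scstep_length n pn c gs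
    rw [List.foldl_cons, ih n pn _ i (by rw [hlen]; intro x hx; exact hb x (List.mem_cons_of_mem _ hx)) hi (by rw [hlen]; exact hil)]
    have hget : PySem.List.pyGetD (pvScStep n pn c gs) i 0
        = if n + gs.1 = i then PySem.List.pyGetD c (n + gs.1) 0 + gs.2 * pn
          else PySem.List.pyGetD c i 0 := by
      unfold pvScStep
      rw [PySem.List.pySetD_of_nonneg _ _ hg0]
      by_cases he : n + gs.1 = i
      · rw [if_pos he, PySem.List.pyGetD_eq_getElem _ _ hi (by rw [List.length_set]; omega)]
        subst he
        rw [List.getElem_set_self]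
      · rw [if_neg he, PySem.List.pyGetD_eq_getElem _ _ hi (by rw [List.length_set]; omega),
            PySem.List.pyGetD_eq_getElem _ _ hi (by omega)]
        rw [List.getElem_set_ne (by omega)]
    rw [hget, List.filter_cons]
    by_cases he : n + gs.1 = i
    · rw [if_pos he, if_pos (by simp [he])]
      simp only [List.map_cons, List.sum_cons]
      rw [he]
      ring
    · rw [if_neg he, if_neg (by simp [he])]

-- splitting the window 0 ≤ i - g ≤ m+1 into 0 ≤ i - g ≤ m plus i - g = m+1
lemma pv_sum_split (l : List (Int × Int)) (f : Int × Int → Int) (i m : Int) (hm : 0 ≤ m) :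
    ((l.filter (fun gs => decide (0 ≤ i - gs.1 ∧ i - gs.1 ≤ m + 1))).map f).sum
      = ((l.filter (fun gs => decide (0 ≤ i - gs.1 ∧ i - gs.1 ≤ m))).map f).sum
        + ((l.filter (fun gs => i - gs.1 = m + 1)).map f).sum := by
  induction l with
  | nil => simp
  | cons gs l ih =>
    simp only [List.filter_cons]
    by_cases h1 : 0 ≤ i - gs.1 ∧ i - gs.1 ≤ m
    · rw [if_pos (by simpa using And.intro h1.1 (by omega : i - gs.1 ≤ m + 1)),
          if_pos (by simpa using h1), if_neg (by simp; omega)]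
      simp only [List.map_cons, List.sum_cons, ih]
      ring
    · by_cases h2 : i - gs.1 = m + 1
      · rw [if_pos (by simp; omega), if_neg (by simp; omega),
            if_pos (by simpa using h2)]
        simp only [List.map_cons, List.sum_cons, ih]
        ring
      · rw [if_neg (by simp; omega), if_neg (by simpa using h1), if_neg (by simpa using h2)]
        exact ih

-- ===== the main loop invariant =====

-- abbreviations used only inside the proofs
def pvAStep : List Int → Int → List Int := fun p n =>
  PySem.List.pySetD p n (PySem.Int.mod (pvAInner p n 0 1 (n.toNat + 2)) 1000000)

def pvBStep (limit : Int) : List Int × List Int → Int → List Int × List Int := fun st n =>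
  let p := if n > 0 then
      PySem.List.pySetD st.1 n (PySem.Int.mod (PySem.List.pyGetD st.2 n 0) 1000000)
    else st.1
  let pn := PySem.List.pyGetD p n 0
  (p, pvBScatter limit n pn 0 1 (limit.toNat + 2) st.2)

-- generalized pentagonal numbers are at least 1
lemma pv_pairs1_lb (lim : Int) (fuel : Nat) : ∀ gs ∈ pvBPairs lim 1 fuel, 1 ≤ gs.1 := by
  intro gs hgs
  have h := pv_bpairs_lb fuel lim 1 (le_refl 1) gs hgs
  have h1 : PySem.Int.floordiv (1 * (3 * 1 - 1)) 2 = 1 := by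
    rw [show (1 : Int) * (3 * 1 - 1) = 2 by ring, PySem.Int.floordiv_eq_ediv_of_pos (by norm_num)]
    norm_num
  omega

-- reading a cell of a written list
lemma pv_getD_set (xs : List Int) (j v i : Int) (hj0 : 0 ≤ j) (hi0 : 0 ≤ i)
    (hil : i < (xs.length : Int)) :
    PySem.List.pyGetD (PySem.List.pySetD xs j v) i 0
      = if i = j then v else PySem.List.pyGetD xs i 0 := by
  rw [PySem.List.pySetD_of_nonneg _ _ hj0,
      PySem.List.pyGetD_eq_getElem _ _ hi0 (by rw [List.length_set]; omega)]
  by_cases h : i = j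
  · subst h
    rw [if_pos rfl, List.getElem_set_self]
  · rw [if_neg h, PySem.List.pyGetD_eq_getElem _ _ hi0 (by omega),
        List.getElem_set_ne (by omega)]

lemma pv_getD_replicate (t : Nat) (i : Int) (hi0 : 0 ≤ i) (hil : i < (t : Int)) :
    PySem.List.pyGetD (List.replicate t (0 : Int)) i 0 = 0 := by
  rw [PySem.List.pyGetD_eq_getElem _ _ hi0 (by simp; omega), List.getElem_replicate]

lemma pv_invariant (limit : Int) (hl : 0 ≤ limit) :
    ∀ (m : Nat), (m : Int) ≤ limit →
    (let P := (PySem.List.pyRange 1 ((m : Int) + 1) 1).foldl pvAStep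
        (PySem.List.pySetD (List.replicate (limit + 1).toNat 0) 0 1);
     let BC := (PySem.List.pyRange 0 ((m : Int) + 1) 1).foldl (pvBStep limit)
        (PySem.List.pySetD (List.replicate (limit + 1).toNat 0) 0 1,
         List.replicate (limit + 1).toNat 0);
     BC.1 = P ∧ P.length = (limit + 1).toNat ∧ BC.2.length = (limit + 1).toNat ∧
     ∀ i : Int, 0 ≤ i → i ≤ limit →
       PySem.List.pyGetD BC.2 i 0
         = (((pvBPairs limit 1 (limit.toNat + 2)).filter
              (fun gs => decide (0 ≤ i - gs.1 ∧ i - gs.1 ≤ (m : Int)))).map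
              (fun gs => gs.2 * PySem.List.pyGetD P (i - gs.1) 0)).sum) := by
  intro m
  induction m with
  | zero =>
    intro _
    simp only [Nat.cast_zero]
    rw [PySem.List.pyRange_one_eq_nil (by norm_num : (1 : Int) ≥ 0 + 1), List.foldl_nil]
    rw [show (0 : Int) + 1 = 0 + 1 from rfl, PySem.List.pyRange_one_succ_right (by norm_num),
        PySem.List.pyRange_one_eq_nil (le_refl 0), List.nil_append, List.foldl_cons, List.foldl_nil]
    simp only [pvBStep]
    rw [if_neg (by norm_num)]
    have hL : ((limit + 1).toNat : Int) = limit + 1 := by omega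
    have hp1len : (PySem.List.pySetD (List.replicate (limit + 1).toNat (0 : Int)) 0 1).length
        = (limit + 1).toNat := by
      rw [PySem.List.pySetD_of_nonneg _ _ (le_refl 0), List.length_set, List.length_replicate]
    have hpn : PySem.List.pyGetD
        (PySem.List.pySetD (List.replicate (limit + 1).toNat (0 : Int)) 0 1) 0 0 = 1 := by
      rw [pv_getD_set _ _ _ _ (le_refl 0) (le_refl 0) (by simp; omega), if_pos rfl]
    refine ⟨rfl, hp1len, ?_, ?_⟩
    · rw [pv_scatter_eq_fold, pv_fold_scatter_length, List.length_replicate]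
    · intro i hi0 hil
      rw [pv_scatter_eq_fold, sub_zero]
      have hb : ∀ gs ∈ pvBPairs limit 1 (limit.toNat + 2),
          0 ≤ 0 + gs.1 ∧ 0 + gs.1 < ((List.replicate (limit + 1).toNat (0 : Int)).length : Int) := by
        intro gs hgs
        have h1 := pv_pairs1_lb limit _ gs hgs
        have h2 := pv_bpairs_ub _ limit 1 gs hgs
        rw [List.length_replicate]
        omega
      rw [pv_fold_scatter_get _ _ _ _ i hb hi0 (by rw [List.length_replicate]; omega)]
      rw [pv_getD_replicate _ _ hi0 (by omega), zero_add]
      rw [List.filter_congr (q := fun gs => decide (0 ≤ i - gs.1 ∧ i - gs.1 ≤ (0 : Int)))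
        (by intro gs _; rw [decide_eq_decide]; omega)]
      refine congrArg List.sum (List.map_congr_left ?_)
      intro gs hgs
      have hmem := (List.mem_filter.mp hgs).2
      simp only [decide_eq_true_eq] at hmem
      have hig : i - gs.1 = 0 := by omega
      rw [hig, hpn]
  | succ m ih =>
    intro hm1
    have hm : (m : Int) ≤ limit := by push_cast at hm1; omega
    have hnlim : (m : Int) + 1 ≤ limit := by push_cast at hm1; omega
    have hL : ((limit + 1).toNat : Int) = limit + 1 := by omega
    obtain ⟨hPQ, hPlen, hClen, hC⟩ := ih hm
    have hcast : ((m + 1 : Nat) : Int) + 1 = ((m : Int) + 1) + 1 := by push_cast; ring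
    rw [hcast, PySem.List.pyRange_one_succ_right (by omega : (1 : Int) ≤ (m : Int) + 1),
        PySem.List.pyRange_one_succ_right (by omega : (0 : Int) ≤ (m : Int) + 1),
        List.foldl_append, List.foldl_append, List.foldl_cons, List.foldl_nil,
        List.foldl_cons, List.foldl_nil]
    set P := (PySem.List.pyRange 1 ((m : Int) + 1) 1).foldl pvAStep
        (PySem.List.pySetD (List.replicate (limit + 1).toNat 0) 0 1) with hP
    set BC := (PySem.List.pyRange 0 ((m : Int) + 1) 1).foldl (pvBStep limit)
        (PySem.List.pySetD (List.replicate (limit + 1).toNat 0) 0 1,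
         List.replicate (limit + 1).toNat 0) with hBC
    have hfilter1 : (pvBPairs limit 1 (limit.toNat + 2)).filter
        (fun gs => decide (0 ≤ ((m : Int) + 1) - gs.1 ∧ ((m : Int) + 1) - gs.1 ≤ (m : Int)))
          = pvBPairs ((m : Int) + 1) 1 (((m : Int) + 1).toNat + 2) := by
      rw [List.filter_congr (q := fun gs => decide (gs.1 ≤ (m : Int) + 1))
          (by intro gs hgs; have := pv_pairs1_lb _ _ gs hgs; rw [decide_eq_decide]; omega)]
      rw [pv_bpairs_filter _ limit ((m : Int) + 1) 1 (le_refl 1) hnlim]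
      exact pv_bpairs_fuel _ _ ((m : Int) + 1) 1 (le_refl 1) (by omega) (by omega)
    have hCn : PySem.List.pyGetD BC.2 ((m : Int) + 1) 0
        = pvAInner P ((m : Int) + 1) 0 1 (((m : Int) + 1).toNat + 2) := by
      rw [hC ((m : Int) + 1) (by omega) hnlim, pv_inner_sum, zero_add, ← hfilter1]
    simp only [pvBStep, pvAStep]
    rw [if_pos (by omega : (m : Int) + 1 > 0), hPQ, hCn]
    set X := PySem.List.pySetD P ((m : Int) + 1)
        (PySem.Int.mod (pvAInner P ((m : Int) + 1) 0 1 (((m : Int) + 1).toNat + 2)) 1000000) with hX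
    have hXlen : X.length = (limit + 1).toNat := by
      rw [hX, PySem.List.pySetD_of_nonneg _ _ (by omega), List.length_set, hPlen]
    refine ⟨rfl, hXlen, ?_, ?_⟩
    · rw [pv_scatter_eq_fold, pv_fold_scatter_length, hClen]
    · intro i hi0 hil
      have hb : ∀ gs ∈ pvBPairs (limit - ((m : Int) + 1)) 1 (limit.toNat + 2),
          0 ≤ ((m : Int) + 1) + gs.1 ∧ ((m : Int) + 1) + gs.1 < (BC.2.length : Int) := by
        intro gs hgs
        have h1 := pv_pairs1_lb _ _ gs hgs
        have h2 := pv_bpairs_ub _ _ 1 gs hgs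
        rw [hClen]
        omega
      rw [pv_scatter_eq_fold,
          pv_fold_scatter_get _ _ _ _ i hb hi0 (by rw [hClen]; omega),
          hC i hi0 hil]
      rw [pv_bpairs_filter _ limit (limit - ((m : Int) + 1)) 1 (le_refl 1) (by omega) |>.symm.trans rfl] at hb ⊢
      have hscat : List.filter
            (fun a => decide ((m : Int) + 1 + a.1 = i) && decide (a.1 ≤ limit - ((m : Int) + 1)))
            (pvBPairs limit 1 (limit.toNat + 2))
          = List.filter (fun gs => decide (i - gs.1 = (m : Int) + 1))
              (pvBPairs limit 1 (limit.toNat + 2)) := by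
        refine List.filter_congr ?_
        intro gs hgs
        by_cases h : (m : Int) + 1 + gs.1 = i
        · have h2 : gs.1 ≤ limit - ((m : Int) + 1) := by omega
          have h3 : i - gs.1 = (m : Int) + 1 := by omega
          simp [h, h2, h3]
        · have h3 : ¬ i - gs.1 = (m : Int) + 1 := by omega
          simp [h, h3]
      rw [List.filter_filter, hscat,
          show ((m + 1 : Nat) : Int) = (m : Int) + 1 from by push_cast; ring,
          pv_sum_split _ _ i (m : Int) (Int.natCast_nonneg m)]
      congr 1
      · refine congrArg List.sum (List.map_congr_left ?_)
        intro gs hgs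
        have hmem := (List.mem_filter.mp hgs).2
        simp only [decide_eq_true_eq] at hmem
        rw [hX, pv_getD_set P ((m : Int) + 1) _ (i - gs.1) (by omega) (by omega)
              (by rw [hPlen]; omega),
            if_neg (by omega)]
      · refine congrArg List.sum (List.map_congr_left ?_)
        intro gs hgs
        have hmem := (List.mem_filter.mp hgs).2
        simp only [decide_eq_true_eq] at hmem
        rw [hmem]

-- ===== VERDICT (by name: the statement is the Claim_ definition above) =====
theorem partition_numbers_spec : Claim_equal_partition_numbers := by
  intro limit _ hpre
  unfold Spec_partition_numbers
  have hl : 0 ≤ limit := hpre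
  have h := (pv_invariant limit hl limit.toNat (by omega)).1
  rw [Int.toNat_of_nonneg hl] at h
  simp only [partition_numbers, partition_numbers_alt]
  exact h.symm
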